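-- pv_equiv track=rewrite | github.com/TadaoYamaoka/gumbel-dlshogi | gumbel_dlshogi/mcts/seq_halving.py | get_sequence_of_considered_visits
-- ===== SOURCE A (Python) =====
-- import math
--
-- def get_sequence_of_considered_visits(max_num_considered_actions, num_simulations):
--     """Returns a sequence of visit counts considered by Sequential Halving.
--
--     Sequential Halving is a "pure exploration" algorithm for bandits, introduced
--     in "Almost Optimal Exploration in Multi-Armed Bandits":
--     http://proceedings.mlr.press/v28/karnin13.pdf
--
--     The visit counts allows to implement Sequential Halving by selecting the best
--     action from the actions with the currently considered visit count.
--
--     Args: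
--      max_num_considered_actions: The maximum number of considered actions.
--        The `max_num_considered_actions` can be smaller than the number of
--        actions.
--      num_simulations: The total simulation budget.
--
--     Returns:
--       A tuple with visit counts. Length `num_simulations`.
--     """
--     if max_num_considered_actions <= 1:
--         return tuple(range(num_simulations))
--     log2max = int(math.ceil(math.log2(max_num_considered_actions)))
--     sequence = []
--     visits = [0] * max_num_considered_actions
--     num_considered = max_num_considered_actions
--     while len(sequence) < num_simulations:
--         num_extra_visits = max(1, int(num_simulations / (log2max * num_considered)))
--         for _ in range(num_extra_visits):
--             sequence.extend(visits[:num_considered])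
--             for i in range(num_considered):
--                 visits[i] += 1
--         # Halving the number of considered actions.
--         num_considered = max(2, num_considered // 2)
--     return tuple(sequence[:num_simulations])
-- ===== SOURCE B (Python) =====
-- def get_sequence_of_considered_visits(max_num_considered_actions, num_simulations):
--     """Sequential Halving visit-count sequence, built in two stages:
--     first a schedule of block widths, then one flattening comprehension."""
--     if max_num_considered_actions <= 1:
--         return tuple(range(num_simulations))
--     log2max = (max_num_considered_actions - 1).bit_length()
--     # Stage 1: schedule of block widths (one entry per emitted block).
--     widths = []
--     total = 0
--     num_considered = max_num_considered_actions
--     while total < num_simulations: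
--         num_extra_visits = max(1, num_simulations // (log2max * num_considered))
--         widths.extend([num_considered] * num_extra_visits)
--         total += num_extra_visits * num_considered
--         num_considered = max(2, num_considered // 2)
--     # Stage 2: block j carries the visit count j.
--     sequence = [v for v, w in enumerate(widths) for _ in range(w)]
--     return tuple(sequence[:num_simulations])
-- ===== Notes on version B (the rewrite author's own statement) =====
-- stated objective: alternative
-- what changed: A's single while loop mutating a per-action visit array is replaced by a two-stage pipeline: stage 1 builds only a schedule of block widths (one width per emitted block, tracking the running total length), stage 2 flattens it in one enumerate-based comprehension where block j carries visit count j; the array and both inner index loops disappear, int(n/x) becomes n//x and ceil(log2(m)) becomes (m-1).bit_length().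
import Mathlib
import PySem

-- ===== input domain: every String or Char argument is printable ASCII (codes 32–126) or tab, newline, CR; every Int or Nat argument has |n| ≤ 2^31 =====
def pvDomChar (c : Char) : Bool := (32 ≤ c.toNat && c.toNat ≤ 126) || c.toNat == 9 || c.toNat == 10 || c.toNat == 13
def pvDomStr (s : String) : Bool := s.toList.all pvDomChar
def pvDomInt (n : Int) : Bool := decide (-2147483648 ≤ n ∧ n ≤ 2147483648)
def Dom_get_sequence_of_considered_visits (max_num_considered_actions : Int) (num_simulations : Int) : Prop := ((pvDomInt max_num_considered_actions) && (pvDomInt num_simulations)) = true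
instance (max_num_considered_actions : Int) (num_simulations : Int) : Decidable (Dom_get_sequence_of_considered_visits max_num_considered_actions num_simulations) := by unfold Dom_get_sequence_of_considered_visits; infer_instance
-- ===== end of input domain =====

-- ===== PORT A =====
-- B replaces A's while loop over a mutated per-action visit array by a two-stage
-- pipeline: a schedule of block widths, then one enumerate-based flattening pass;
-- objective: alternative (no speed claim).

-- int(math.ceil(math.log2(m))): exact for 2 <= m <= 2^31 (the float computation is exact
-- enough there; ceil(log2 m) is the least k with 2^k >= m, i.e. Nat.clog 2).
def pvClog2 (m : Int) : Int := (Nat.clog 2 m.toNat : Int)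

-- for i in range(num_considered): visits[i] += 1
def pvIncPrefix (visits : List Int) (nc : Int) : List Int :=
  (PySem.List.pyRange 0 nc 1).foldl
    (fun v i => PySem.List.pySetD v i (PySem.List.pyGetD v i 0 + 1)) visits

-- for _ in range(num_extra_visits): sequence.extend(visits[:num_considered]); <inner loop>
def pvInnerA : Nat → List Int → List Int → Int → List Int × List Int
  | 0, seq, visits, _ => (seq, visits)
  | k+1, seq, visits, nc =>
      pvInnerA k (seq ++ PySem.List.slice visits none (some nc)) (pvIncPrefix visits nc) nc

-- the while loop; fuel = num_simulations.toNat + 1 is enough since every iteration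
-- appends at least two elements (fuel only makes the recursion structural)
def pvLoopA (n log2max : Int) : Nat → List Int → List Int → Int → List Int
  | 0, seq, _, _ => seq
  | fuel+1, seq, visits, nc =>
      if (seq.length : Int) < n then
        let nev := max 1 (PySem.Int.truncdiv n (log2max * nc))  -- int(n / (log2max*nc)), exact for |args| ≤ 2^31
        let st := pvInnerA nev.toNat seq visits nc
        pvLoopA n log2max fuel st.1 st.2 (max 2 (PySem.Int.floordiv nc 2))
      else seq

def get_sequence_of_considered_visits (max_num_considered_actions : Int) (num_simulations : Int) : List Int :=
  if max_num_considered_actions ≤ 1 then PySem.List.pyRange 0 num_simulations 1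
  else
    let log2max := pvClog2 max_num_considered_actions
    let seq := pvLoopA num_simulations log2max (num_simulations.toNat + 1) []
                 (List.replicate max_num_considered_actions.toNat 0) max_num_considered_actions
    PySem.List.slice seq none (some num_simulations)

-- ===== PORT B =====
-- Stage 1: while total < n: widths.extend([c]*extra); total += extra*c; c = max(2, c//2)
-- (fuel makes the recursion structural, as in A's port)
def pvSchedB (n log2max : Int) : Nat → List Int → Int → Int → List Int
  | 0, ws, _, _ => ws
  | fuel+1, ws, total, c =>
      if total < n then
        let nev := max 1 (PySem.Int.floordiv n (log2max * c))
        pvSchedB n log2max fuel (ws ++ List.replicate nev.toNat c) (total + nev * c)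
          (max 2 (PySem.Int.floordiv c 2))
      else ws

def get_sequence_of_considered_visits_alt (max_num_considered_actions : Int) (num_simulations : Int) : List Int :=
  if max_num_considered_actions ≤ 1 then PySem.List.pyRange 0 num_simulations 1
  else
    let log2max := ((PySem.Int.bitLength (max_num_considered_actions - 1) : Nat) : Int)
    let widths := pvSchedB num_simulations log2max (num_simulations.toNat + 1) [] 0 max_num_considered_actions
    -- [v for v, w in enumerate(widths) for _ in range(w)]
    let seq := (PySem.List.enumerate widths).flatMap (fun p => List.replicate p.2.toNat p.1)
    PySem.List.slice seq none (some num_simulations)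

-- ===== PRECONDITION & SPEC =====
def Spec_get_sequence_of_considered_visits (max_num_considered_actions : Int) (num_simulations : Int) (out : List Int) : Prop := out = get_sequence_of_considered_visits_alt max_num_considered_actions num_simulations
instance (max_num_considered_actions : Int) (num_simulations : Int) (out : List Int) : Decidable (Spec_get_sequence_of_considered_visits max_num_considered_actions num_simulations out) := by unfold Spec_get_sequence_of_considered_visits; infer_instance

-- ===== CLAIM =====
def Claim_equal_get_sequence_of_considered_visits : Prop := ∀ (max_num_considered_actions : Int) (num_simulations : Int), Dom_get_sequence_of_considered_visits max_num_considered_actions num_simulations → Spec_get_sequence_of_considered_visits max_num_considered_actions num_simulations (get_sequence_of_considered_visits max_num_considered_actions num_simulations)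

-- ===== LEMMAS AND PROOFS =====

-- the flattening of a width list starting at block value v
def pvG (v : Int) : List Int → List Int
  | [] => []
  | w :: ws => List.replicate w.toNat v ++ pvG (v + 1) ws

theorem pv_flatMap_enumerate (ws : List Int) : ∀ (s : Int),
    (PySem.List.enumerate ws s).flatMap (fun p => List.replicate p.2.toNat p.1) = pvG s ws := by
  induction ws with
  | nil => intro s; simp [PySem.List.enumerate_nil, pvG]
  | cons w ws ih => intro s; simp [PySem.List.enumerate_cons, pvG, ih]

theorem pvG_append (ws1 : List Int) : ∀ (v : Int) (ws2 : List Int),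
    pvG v (ws1 ++ ws2) = pvG v ws1 ++ pvG (v + ws1.length) ws2 := by
  induction ws1 with
  | nil => intro v ws2; simp [pvG]
  | cons w ws ih =>
    intro v ws2
    simp only [List.cons_append, pvG, ih, List.append_assoc, List.length_cons]
    congr 3
    push_cast; ring

theorem pvG_length_replicate (k : Nat) : ∀ (v c : Int),
    (pvG v (List.replicate k c)).length = k * c.toNat := by
  induction k with
  | zero => intro v c; simp [pvG]
  | succ k ih => intro v c; simp [List.replicate_succ, pvG, ih]; ring

theorem pvSched_acc (n l : Int) (fuel : Nat) : ∀ (ws : List Int) (t c : Int),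
    pvSchedB n l fuel ws t c = ws ++ pvSchedB n l fuel [] t c := by
  induction fuel with
  | zero => intro ws t c; simp [pvSchedB]
  | succ fuel ih =>
    intro ws t c
    simp only [pvSchedB]
    split_ifs with h
    · rw [ih, ih (([] : List Int) ++ _)]; simp
    · simp

-- incrementing the first k entries of a list whose k-prefix is uniform
theorem pv_incPrefix_replicate (k : Nat) (visited : Int) (rest : List Int) :
    pvIncPrefix (List.replicate k visited ++ rest) (k : Int)
      = List.replicate k (visited + 1) ++ rest := by
  induction k generalizing rest with
  | zero => simp [pvIncPrefix]
  | succ k ih =>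
    unfold pvIncPrefix
    have hcast : ((k + 1 : Nat) : Int) = (k : Int) + 1 := by push_cast; ring
    rw [hcast, PySem.List.pyRange_one_succ_right (by positivity), List.foldl_append]
    have hinit : List.replicate (k + 1) visited ++ rest
        = List.replicate k visited ++ (visited :: rest) := by
      simp [List.replicate_succ']
    rw [hinit]
    have hih := ih (visited :: rest)
    unfold pvIncPrefix at hih
    rw [hih]
    simp only [List.foldl_cons, List.foldl_nil]
    rw [PySem.List.pyGetD_natCast, PySem.List.pySetD_natCast]
    have hg : (List.replicate k (visited + 1) ++ visited :: rest).getD k 0 = visited := by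
      simp [List.getD]
    rw [hg, List.set_append_right k _ (by simp)]
    simp [List.replicate_succ']

theorem pv_inner_eq (k0 : Nat) (k : Nat) :
    ∀ (seq visits : List Int) (visited : Int),
      k0 ≤ visits.length → visits.take k0 = List.replicate k0 visited →
      (pvInnerA k seq visits (k0 : Int)).1 = seq ++ pvG visited (List.replicate k ((k0 : Nat) : Int))
      ∧ (pvInnerA k seq visits (k0 : Int)).2.length = visits.length
      ∧ (pvInnerA k seq visits (k0 : Int)).2.take k0
          = List.replicate k0 (visited + (k : Int)) := by
  induction k with
  | zero =>
    intro seq visits visited _ h3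
    refine ⟨by simp [pvInnerA, pvG], rfl, by simpa using h3⟩
  | succ k ih =>
    intro seq visits visited h2 h3
    simp only [pvInnerA]
    have hslice : PySem.List.slice visits none (some (k0 : Int))
        = List.replicate k0 visited := by
      rw [PySem.List.slice_to_natCast]; exact h3
    have hsplit : visits = List.replicate k0 visited ++ visits.drop k0 := by
      conv_lhs => rw [← List.take_append_drop k0 visits, h3]
    have hinc : pvIncPrefix visits (k0 : Int)
        = List.replicate k0 (visited + 1) ++ visits.drop k0 := by
      conv_lhs => rw [hsplit]
      exact pv_incPrefix_replicate k0 visited (visits.drop k0)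
    rw [hslice, hinc]
    obtain ⟨e1, e2, e3⟩ := ih (seq ++ List.replicate k0 visited)
      (List.replicate k0 (visited + 1) ++ visits.drop k0) (visited + 1)
      (by simp) (by simp)
    refine ⟨?_, e2.trans (by simp; omega), e3.trans ?_⟩
    · rw [e1]
      have hrep : (k0 : Int).toNat = k0 := by simp
      simp only [List.replicate_succ, pvG, hrep, List.append_assoc]
    · congr 1
      push_cast; ring

-- ceil(log2 m) = (m-1).bit_length() for m ≥ 2
theorem pv_clog_eq_bitLength (m : Int) (hm : 2 ≤ m) :
    pvClog2 m = ((PySem.Int.bitLength (m - 1) : Nat) : Int) := by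
  unfold pvClog2
  have hne : m - 1 ≠ 0 := by omega
  have h1 := PySem.Int.two_pow_bitLength_le (m - 1) hne
  have h2 := PySem.Int.lt_two_pow_bitLength (m - 1)
  set k := PySem.Int.bitLength (m - 1) with hk
  set c := Nat.clog 2 m.toNat with hc
  have habs : (m - 1).natAbs = m.toNat - 1 := by omega
  rw [habs] at h1 h2
  have hm2 : 2 ≤ m.toNat := by omega
  have hc1 : m.toNat ≤ 2 ^ c := Nat.le_pow_clog (by norm_num) _
  have hc2 : 2 ^ (c - 1) < m.toNat := Nat.pow_pred_clog_lt_self (by norm_num) (by omega)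
  have hk0 : 0 < k := by
    rcases Nat.eq_zero_or_pos k with h | h
    · rw [h] at h2; simp at h2; omega
    · exact h
  have hck : c ≤ k := by
    have hlt : 2 ^ (c - 1) < 2 ^ k := by omega
    have := (Nat.pow_lt_pow_iff_right (a := 2) (by norm_num)).mp hlt
    omega
  have hkc : k ≤ c := by
    have hlt : 2 ^ (k - 1) < 2 ^ c := by omega
    have := (Nat.pow_lt_pow_iff_right (a := 2) (by norm_num)).mp hlt
    omega
  omega

theorem pv_loop_eq (n log2max : Int) (hl : 0 < log2max) (fuel : Nat)
    (seq visits : List Int) (visited nc : Int)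
    (h1 : 2 ≤ nc) (h2 : nc ≤ (visits.length : Int))
    (h3 : visits.take nc.toNat = List.replicate nc.toNat visited) :
    pvLoopA n log2max fuel seq visits nc
      = seq ++ pvG visited (pvSchedB n log2max fuel [] (seq.length : Int) nc) := by
  induction fuel generalizing seq visits visited nc with
  | zero => simp [pvLoopA, pvSchedB, pvG]
  | succ fuel ih =>
    obtain ⟨k0, rfl⟩ : ∃ k0 : Nat, nc = (k0 : Int) := ⟨nc.toNat, by omega⟩
    simp only [Int.toNat_natCast] at h3
    have hk2 : 2 ≤ k0 := by exact_mod_cast h1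
    have hkl : k0 ≤ visits.length := by exact_mod_cast h2
    simp only [pvLoopA, pvSchedB]
    by_cases hg : ((seq.length : Nat) : Int) < n
    · simp only [hg, if_true]
      have hn : 0 ≤ n := le_trans (by positivity) (le_of_lt hg)
      have hdiv : 0 < log2max * (k0 : Int) :=
        mul_pos hl (by exact_mod_cast Nat.lt_of_lt_of_le (by norm_num) hk2)
      have htd : PySem.Int.truncdiv n (log2max * (k0 : Int))
          = PySem.Int.floordiv n (log2max * (k0 : Int)) := by
        simp only [PySem.Int.truncdiv]
        rw [Int.tdiv_eq_ediv_of_nonneg hn, PySem.Int.floordiv_eq_ediv_of_pos hdiv]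
      rw [htd]
      set nev := max 1 (PySem.Int.floordiv n (log2max * (k0 : Int))) with hnev
      have hnev1 : 1 ≤ nev := le_max_left _ _
      obtain ⟨e1, e2, e3⟩ := pv_inner_eq k0 nev.toNat seq visits visited hkl h3
      have hnevcast : ((nev.toNat : Nat) : Int) = nev := by omega
      rw [hnevcast] at e3
      have hfd : PySem.Int.floordiv ((k0 : Nat) : Int) 2 = ((k0 / 2 : Nat) : Int) := by
        exact_mod_cast PySem.Int.floordiv_natCast k0 2
      have hmax : max (2 : Int) ((k0 / 2 : Nat) : Int) = ((max 2 (k0 / 2) : Nat) : Int) := by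
        simp [Nat.cast_max]
      rw [hfd, hmax]
      have hk2' : 2 ≤ max 2 (k0 / 2) := Nat.le_max_left _ _
      have hle : max 2 (k0 / 2) ≤ k0 := by omega
      have ihm := ih (pvInnerA nev.toNat seq visits (k0 : Int)).1
        (pvInnerA nev.toNat seq visits (k0 : Int)).2 (visited + nev)
        ((max 2 (k0 / 2) : Nat) : Int) (by exact_mod_cast hk2')
        (by rw [e2]; exact_mod_cast le_trans hle hkl)
        (by
          simp only [Int.toNat_natCast]
          conv_lhs => rw [← Nat.min_eq_left hle, ← List.take_take]
          rw [e3, List.take_replicate, Nat.min_eq_left hle])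
      rw [ihm, e1]
      have hlen : (((seq ++ pvG visited (List.replicate nev.toNat (k0 : Int))).length : Nat) : Int)
          = (seq.length : Int) + nev * (k0 : Int) := by
        simp only [List.length_append, pvG_length_replicate, Int.toNat_natCast,
          Nat.cast_add, Nat.cast_mul, hnevcast]
      rw [hlen]
      simp only [List.nil_append]
      rw [pvSched_acc n log2max fuel (List.replicate nev.toNat ((k0 : Nat) : Int))]
      rw [pvG_append, List.append_assoc]
      rw [List.length_replicate, hnevcast]
    · simp only [hg, if_false, pvG, List.append_nil]

-- ===== VERDICT =====
theorem get_sequence_of_considered_visits_spec : Claim_equal_get_sequence_of_considered_visits := by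
  intro m n _
  unfold Spec_get_sequence_of_considered_visits
  unfold get_sequence_of_considered_visits get_sequence_of_considered_visits_alt
  by_cases hm : m ≤ 1
  · simp [hm]
  · simp only [hm, if_false]
    have hm2 : 2 ≤ m := by omega
    rw [← pv_clog_eq_bitLength m hm2]
    congr 1
    rw [pv_flatMap_enumerate]
    have hl : 0 < pvClog2 m := by
      unfold pvClog2
      have : 0 < Nat.clog 2 m.toNat := Nat.clog_pos (by omega) (by omega)
      omega
    have := pv_loop_eq n (pvClog2 m) hl (n.toNat + 1)
      [] (List.replicate m.toNat 0) 0 m hm2 (by simp) (by simp)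
    simpa using this
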